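-- pv_equiv track=rewrite | github.com/sgwon96/codingTest | hash4.py | solution
-- ===== SOURCE A (Python) =====
-- def solution(genres, plays):
--     genrePlayMap = dict()
--     genreIdMap = dict()
--
--     for i in range(len(genres)):
--         if genres[i] not in genrePlayMap:
--             genrePlayMap[genres[i]] = plays[i]
--             genreIdMap[genres[i]] = [[i,plays[i]]]
--         else:
--             genrePlayMap[genres[i]] += plays[i]
--             genreIdMap[genres[i]].append([i,plays[i]])
--
--     sortedGenres = [item[0] for item in sorted(genrePlayMap.items(), key = (lambda x: x[1]), reverse = True)]
--
--     answer = []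
--     for genre in sortedGenres:
--         sortedIds = sorted(genreIdMap[genre], key = (lambda x: x[0]))
--         sortedIds = sorted(sortedIds, key = (lambda x: x[1]), reverse = True)
--         answer += [i[0] for i in sortedIds[:2]]
--
--     return answer
-- ===== SOURCE B (Python) =====
-- def _push(t, i, p):
--     # keep the best two (plays desc, index asc) seen so far; strict '>' keeps earlier index on ties
--     if not t:
--         return [(i, p)]
--     if p > t[0][1]:
--         return [(i, p), t[0]]
--     if len(t) == 1 or p > t[1][1]:
--         return [t[0], (i, p)]
--     return t
--
-- def solution(genres, plays):
--     totals = {}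
--     top2 = {}
--     for i, (g, p) in enumerate(zip(genres, plays)):
--         totals[g] = totals.get(g, 0) + p
--         top2[g] = _push(top2.get(g, []), i, p)
--     order = []
--     remaining = list(totals.items())
--     while remaining:
--         best = 0
--         for j in range(1, len(remaining)):
--             if remaining[j][1] > remaining[best][1]:
--                 best = j
--         order.append(remaining.pop(best)[0])
--     answer = []
--     for g in order:
--         answer += [i for i, _ in top2[g]]
--     return answer
-- ===== Notes on version B (the rewrite author's own statement) =====
-- stated objective: alternative
-- what changed: Removes all sorting: a single streaming pass keeps each genre's running top-2 tracks (strict comparisons preserve the lower-index tie-break), and genres are ordered by repeated first-argmax extraction (selection) from the totals instead of a stable reverse sort.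
import Mathlib
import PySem

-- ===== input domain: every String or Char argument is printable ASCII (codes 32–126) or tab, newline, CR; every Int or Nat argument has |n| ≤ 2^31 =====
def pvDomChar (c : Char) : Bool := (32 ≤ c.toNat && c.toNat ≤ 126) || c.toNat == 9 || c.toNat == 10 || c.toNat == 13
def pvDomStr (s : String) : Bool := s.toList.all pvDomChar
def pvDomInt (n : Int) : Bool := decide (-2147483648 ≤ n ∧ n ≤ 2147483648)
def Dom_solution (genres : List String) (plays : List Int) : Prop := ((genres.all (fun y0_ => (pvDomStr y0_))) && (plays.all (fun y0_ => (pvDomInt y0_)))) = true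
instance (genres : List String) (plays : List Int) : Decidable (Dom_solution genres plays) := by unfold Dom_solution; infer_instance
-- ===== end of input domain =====

-- B removes all sorting: one streaming pass keeps each genre's running top-2 tracks and the
-- genre order is produced by repeated first-argmax extraction; same return value on Pre_.

-- ===== PORT A =====
def solution (genres : List String) (plays : List Int) : List Int :=
  let st :=
    (PySem.List.pyRange 0 (genres.length : Int)).foldl
      (fun (st : PySem.Dict String Int × PySem.Dict String (List (Int × Int))) i =>
        if st.1.contains (PySem.List.pyGetD genres i "") = false then
          (st.1.insert (PySem.List.pyGetD genres i "") (PySem.List.pyGetD plays i 0),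
           st.2.insert (PySem.List.pyGetD genres i "") [(i, PySem.List.pyGetD plays i 0)])
        else
          (st.1.insert (PySem.List.pyGetD genres i "")
              (st.1.getD (PySem.List.pyGetD genres i "") 0 + PySem.List.pyGetD plays i 0),
           st.2.modify (PySem.List.pyGetD genres i "") []
              (fun l => l ++ [(i, PySem.List.pyGetD plays i 0)])))
      ((PySem.Dict.empty : PySem.Dict String Int),
       (PySem.Dict.empty : PySem.Dict String (List (Int × Int))))
  let sortedGenres := (PySem.List.sorted st.1.items (fun kv => kv.2) true).map (fun kv => kv.1)
  sortedGenres.foldl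
    (fun acc genre =>
      let sortedIds := PySem.List.sorted (st.2.getD genre []) (fun x => x.1) false
      let sortedIds2 := PySem.List.sorted sortedIds (fun x => x.2) true
      acc ++ (PySem.List.slice sortedIds2 none (some 2)).map (fun x => x.1)) []

-- ===== PORT B =====
-- _push: keep the best two (plays desc, index asc) seen so far
def pvPush (t : List (Int × Int)) (i p : Int) : List (Int × Int) :=
  match t with
  | [] => [(i, p)]
  | [a] => if a.2 < p then [(i, p), a] else [a, (i, p)]
  | a :: b :: r =>
    if a.2 < p then [(i, p), a]
    else if b.2 < p then [a, (i, p)]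
    else a :: b :: r

-- the inner 'for j in range(1, len(remaining))' scan for the first argmax
def pvBestIdx (remaining : List (String × Int)) : Int :=
  (PySem.List.pyRange 1 (remaining.length : Int)).foldl
    (fun best j =>
      if (PySem.List.pyGetD remaining best ("", 0)).2 < (PySem.List.pyGetD remaining j ("", 0)).2
      then j else best)
    0

-- the 'while remaining:' extraction loop building 'order'
def pvSelect (remaining : List (String × Int)) : List String :=
  match _h : PySem.List.pop? remaining (pvBestIdx remaining) with
  | none => []
  | some (x, rest) => x.1 :: pvSelect rest
termination_by remaining.length
decreasing_by
  have := PySem.List.length_of_pop?_eq_some remaining _h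
  simp at this ⊢
  omega

def solution_alt (genres : List String) (plays : List Int) : List Int :=
  let st :=
    (PySem.List.enumerate (genres.zip plays)).foldl
      (fun (st : PySem.Dict String Int × PySem.Dict String (List (Int × Int))) x =>
        (st.1.insert x.2.1 (st.1.getD x.2.1 0 + x.2.2),
         st.2.modify x.2.1 [] (fun t => pvPush t x.1 x.2.2)))
      ((PySem.Dict.empty : PySem.Dict String Int),
       (PySem.Dict.empty : PySem.Dict String (List (Int × Int))))
  let order := pvSelect st.1.items
  order.foldl (fun acc g => acc ++ ((st.2.getD g []).map (fun q => q.1))) []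

-- ===== PRECONDITION & SPEC =====
-- Pre_ excludes exactly the inputs where A raises IndexError: plays shorter than genres.
def Pre_solution (genres : List String) (plays : List Int) : Prop :=
  genres.length ≤ plays.length
instance (genres : List String) (plays : List Int) : Decidable (Pre_solution genres plays) := by
  unfold Pre_solution; infer_instance

def pvWitness_solution : List String × List Int :=
  (["pop", "rock", "pop"], [500, 600, 150])

def Spec_solution (genres : List String) (plays : List Int) (out : List Int) : Prop := out = solution_alt genres plays
instance (genres : List String) (plays : List Int) (out : List Int) : Decidable (Spec_solution genres plays out) := by unfold Spec_solution; infer_instance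

-- ===== CLAIM (what is proved, stated in full; the proofs are below) =====
def Claim_equal_solution : Prop := ∀ (genres : List String) (plays : List Int), Dom_solution genres plays → Pre_solution genres plays → Spec_solution genres plays (solution genres plays)

-- ===== LEMMAS AND PROOFS =====

-- the list of (genre, index, plays) triples both programs' first loop traverses
def pvT (genres : List String) (plays : List Int) : List (String × Int × Int) :=
  (PySem.List.pyRange 0 (genres.length : Int)).map
    (fun i => (PySem.List.pyGetD genres i "", i, PySem.List.pyGetD plays i 0))

def pvGP (genres : List String) (plays : List Int) : PySem.Dict String Int :=
  (pvT genres plays).foldl (fun d x => d.insert x.1 (d.getD x.1 0 + x.2.2))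
    (PySem.Dict.empty : PySem.Dict String Int)

def pvID (genres : List String) (plays : List Int) : PySem.Dict String (List (Int × Int)) :=
  (pvT genres plays).foldl (fun d x => d.modify x.1 [] (fun l => l ++ [x.2]))
    (PySem.Dict.empty : PySem.Dict String (List (Int × Int)))

def pvTop (genres : List String) (plays : List Int) : PySem.Dict String (List (Int × Int)) :=
  (pvT genres plays).foldl (fun d x => d.modify x.1 [] (fun t => pvPush t x.2.1 x.2.2))
    (PySem.Dict.empty : PySem.Dict String (List (Int × Int)))

-- A's one loop with a pair state splits into two independent dictionary folds
lemma pv_foldlA_split :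
    ∀ (t : List (String × Int × Int)) (d1 : PySem.Dict String Int)
      (d2 : PySem.Dict String (List (Int × Int))),
      (∀ g, d1.contains g = d2.contains g) →
      t.foldl
        (fun (st : PySem.Dict String Int × PySem.Dict String (List (Int × Int))) x =>
          if st.1.contains x.1 = false then
            (st.1.insert x.1 x.2.2, st.2.insert x.1 [x.2])
          else
            (st.1.insert x.1 (st.1.getD x.1 0 + x.2.2),
             st.2.modify x.1 [] (fun l => l ++ [x.2]))) (d1, d2)
      = (t.foldl (fun d x => d.insert x.1 (d.getD x.1 0 + x.2.2)) d1,
         t.foldl (fun d x => d.modify x.1 [] (fun l => l ++ [x.2])) d2) := by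
  intro t
  induction t with
  | nil => intro d1 d2 _; rfl
  | cons x t ih =>
    intro d1 d2 hc
    simp only [List.foldl_cons]
    by_cases h : d1.contains x.1 = false
    · have h2 : d2.contains x.1 = false := (hc x.1) ▸ h
      rw [if_pos h]
      have e1 : d1.insert x.1 x.2.2 = d1.insert x.1 (d1.getD x.1 0 + x.2.2) := by
        rw [PySem.Dict.getD_of_not_contains d1 0 h, zero_add]
      have e2 : d2.insert x.1 [x.2] = d2.modify x.1 [] (fun l => l ++ [x.2]) := by
        show _ = d2.insert x.1 ((d2.getD x.1 []) ++ [x.2])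
        rw [PySem.Dict.getD_of_not_contains d2 [] h2, List.nil_append]
      rw [e1, e2]
      exact ih _ _ (by
        intro g
        rw [PySem.Dict.contains_insert, PySem.Dict.contains_modify, hc g])
    · rw [if_neg h]
      exact ih _ _ (by
        intro g
        rw [PySem.Dict.contains_insert, PySem.Dict.contains_modify, hc g])


-- B's grouping fold: lookup of one key = fold of pvPush over that key's triples
lemma pv_getD_foldl_modify_push :
    ∀ (l : List (String × Int × Int)) (d : PySem.Dict String (List (Int × Int))) (g : String),
      (l.foldl (fun d x => d.modify x.1 [] (fun t => pvPush t x.2.1 x.2.2)) d).getD g []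
      = (l.filter (fun x => x.1 == g)).foldl (fun t x => pvPush t x.2.1 x.2.2) (d.getD g []) := by
  intro l
  induction l with
  | nil => intro d g; rfl
  | cons x l ih =>
    intro d g
    simp only [List.foldl_cons, List.filter_cons]
    by_cases h : x.1 = g
    · simp only [h, BEq.rfl, if_pos, ih, List.foldl_cons]
      rw [PySem.Dict.getD_modify_self]
    · have hb : (x.1 == g) = false := beq_eq_false_iff_ne.mpr h
      simp only [hb, Bool.false_eq_true, if_false, ih]
      rw [PySem.Dict.getD_modify_of_ne _ _ _ (fun hgx => h hgx.symm)]

-- one step of the streaming top-2 = take 2 after one stable descending insertion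
lemma pv_push_insert (x : Int × Int) (S : List (Int × Int)) :
    (PySem.List.insertBy (fun a b => decide (b.2 < a.2)) x S).take 2
    = pvPush (S.take 2) x.1 x.2 := by
  match S with
  | [] => simp [PySem.List.insertBy, pvPush]
  | [a] =>
    by_cases h : a.2 < x.2 <;>
      simp [PySem.List.insertBy, pvPush, h]
  | a :: b :: S'' =>
    by_cases h1 : a.2 < x.2
    · simp [PySem.List.insertBy, pvPush, h1]
    · by_cases h2 : b.2 < x.2 <;>
        simp [PySem.List.insertBy, pvPush, h1, h2]

lemma pv_foldl_push :
    ∀ (L S : List (Int × Int)),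
      L.foldl (fun t x => pvPush t x.1 x.2) (S.take 2)
      = (L.foldl (fun acc x => PySem.List.insertBy (fun a b => decide (b.2 < a.2)) x acc) S).take 2 := by
  intro L
  induction L with
  | nil => intro S; rfl
  | cons x L ih =>
    intro S
    simp only [List.foldl_cons]
    rw [← pv_push_insert, ih]

-- the streaming top-2 over a list IS the first two of its stable descending sort
lemma pv_top2 (L : List (Int × Int)) :
    L.foldl (fun t x => pvPush t x.1 x.2) []
    = (PySem.List.sorted L (fun x => x.2) true).take 2 := by
  rw [PySem.List.sorted_rev_eq_foldl_insertBy]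
  have := pv_foldl_push L []
  simpa using this

-- the 'for j in range(1, m)' scan returns the first argmax of the first m entries
lemma pv_scan (l : List (String × Int)) :
    ∀ (m : Nat), 1 ≤ m → m ≤ l.length →
      ∃ j : Nat,
        (PySem.List.pyRange 1 (m : Int)).foldl
          (fun best k =>
            if (PySem.List.pyGetD l best ("", 0)).2 < (PySem.List.pyGetD l k ("", 0)).2
            then k else best) 0 = (j : Int)
        ∧ j < m
        ∧ (∀ k : Nat, k < j →
            (PySem.List.pyGetD l (k : Int) ("", 0)).2 < (PySem.List.pyGetD l (j : Int) ("", 0)).2)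
        ∧ (∀ k : Nat, k < m →
            (PySem.List.pyGetD l (k : Int) ("", 0)).2 ≤ (PySem.List.pyGetD l (j : Int) ("", 0)).2) := by
  intro m
  induction m with
  | zero => intro h; omega
  | succ m ih =>
    intro _ hlen
    by_cases hm : m = 0
    · subst hm
      refine ⟨0, ?_, by omega, by omega, ?_⟩
      · have : PySem.List.pyRange 1 ((1 : Nat) : Int) = [] := by decide
        rw [this]
        rfl
      · intro k hk
        interval_cases k
        exact le_refl _
    · obtain ⟨j, hfold, hjm, hlt, hle⟩ := ih (by omega) (by omega)
      have hcast : ((m + 1 : Nat) : Int) = (m : Int) + 1 := by push_cast; ring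
      rw [hcast, PySem.List.pyRange_one_succ_right (by exact_mod_cast Nat.one_le_iff_ne_zero.mpr hm),
        List.foldl_append, hfold]
      simp only [List.foldl_cons, List.foldl_nil]
      by_cases hc : (PySem.List.pyGetD l (j : Int) ("", 0)).2 < (PySem.List.pyGetD l (m : Int) ("", 0)).2
      · refine ⟨m, by rw [if_pos hc], by omega, ?_, ?_⟩
        · intro k hk
          exact lt_of_le_of_lt (hle k hk) hc
        · intro k hk
          rcases Nat.lt_succ_iff_lt_or_eq.mp hk with h | h
          · exact le_of_lt (lt_of_le_of_lt (hle k h) hc)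
          · subst h; exact le_refl _
      · refine ⟨j, by rw [if_neg hc], by omega, hlt, ?_⟩
        intro k hk
        rcases Nat.lt_succ_iff_lt_or_eq.mp hk with h | h
        · exact hle k h
        · subst h; exact le_of_not_gt hc

-- pvBestIdx finds the first argmax
lemma pv_best (l : List (String × Int)) (hl : 0 < l.length) :
    ∃ j : Nat, pvBestIdx l = (j : Int) ∧ j < l.length
      ∧ (∀ k : Nat, k < j →
          (PySem.List.pyGetD l (k : Int) ("", 0)).2 < (PySem.List.pyGetD l (j : Int) ("", 0)).2)
      ∧ (∀ k : Nat, k < l.length →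
          (PySem.List.pyGetD l (k : Int) ("", 0)).2 ≤ (PySem.List.pyGetD l (j : Int) ("", 0)).2) := by
  obtain ⟨j, hfold, hjm, hlt, hle⟩ := pv_scan l l.length hl (le_refl _)
  exact ⟨j, hfold, hjm, hlt, hle⟩

-- inserting an element strictly greater than everything present puts it in front
lemma pv_insert_head {α : Type} (key : α → Int) (x : α) (S : List α)
    (h : ∀ y ∈ S, key y < key x) :
    PySem.List.insertBy (fun a b => decide (key b < key a)) x S = x :: S := by
  cases S with
  | nil => rfl
  | cons y S' =>
    have := h y List.mem_cons_self
    simp [PySem.List.insertBy, this]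

-- inserting only elements ≤ the head keeps the head in front
lemma pv_foldl_ins_head {α : Type} (key : α → Int) :
    ∀ (L : List α) (S : List α) (x : α), (∀ z ∈ L, key z ≤ key x) →
      L.foldl (fun acc z => PySem.List.insertBy (fun a b => decide (key b < key a)) z acc) (x :: S)
      = x :: L.foldl (fun acc z => PySem.List.insertBy (fun a b => decide (key b < key a)) z acc) S := by
  intro L
  induction L with
  | nil => intro S x _; rfl
  | cons z L ih =>
    intro S x h
    have hz : ¬ key x < key z := not_lt.mpr (h z List.mem_cons_self)
    simp only [List.foldl_cons]
    rw [show PySem.List.insertBy (fun a b => decide (key b < key a)) z (x :: S)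
        = x :: PySem.List.insertBy (fun a b => decide (key b < key a)) z S by
      simp [PySem.List.insertBy, hz]]
    exact ih _ _ (fun w hw => h w (List.mem_cons_of_mem _ hw))

-- extracting the first argmax is taking the head of the stable descending sort
lemma pv_head_extract (l : List (String × Int)) (j : Nat) (hj : j < l.length)
    (hlt : ∀ k : Nat, (hk : k < l.length) → k < j → (l[k]'hk).2 < (l[j]'hj).2)
    (hle : ∀ k : Nat, (hk : k < l.length) → (l[k]'hk).2 ≤ (l[j]'hj).2) :
    PySem.List.sorted l (fun kv => kv.2) true
    = l[j]'hj :: PySem.List.sorted (l.eraseIdx j) (fun kv => kv.2) true := by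
  have hsplit : l = l.take j ++ (l[j]'hj) :: l.drop (j + 1) := by
    conv_lhs => rw [← List.take_append_drop j l]
    rw [List.drop_eq_getElem_cons hj]
  have htake : ∀ y ∈ l.take j, y.2 < (l[j]'hj).2 := by
    intro y hy
    obtain ⟨i, hi, hyi⟩ := List.mem_iff_getElem.mp hy
    have hij : i < j := by
      have := hi; simp only [List.length_take] at this; omega
    have hil : i < l.length := by omega
    have : (l.take j)[i]'hi = l[i]'hil := List.getElem_take
    rw [← hyi, this]
    exact hlt i hil hij
  have hdrop : ∀ z ∈ l.drop (j + 1), z.2 ≤ (l[j]'hj).2 := by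
    intro z hz
    obtain ⟨i, hi, hzi⟩ := List.mem_iff_getElem.mp hz
    have hil : j + 1 + i < l.length := by
      have := hi; simp only [List.length_drop] at this; omega
    have : (l.drop (j + 1))[i]'hi = l[j + 1 + i]'hil := List.getElem_drop
    rw [← hzi, this]
    exact hle _ hil
  rw [PySem.List.sorted_rev_eq_foldl_insertBy, PySem.List.sorted_rev_eq_foldl_insertBy]
  have herase : l.eraseIdx j = l.take j ++ l.drop (j + 1) := List.eraseIdx_eq_take_drop_succ l j
  conv_lhs => rw [hsplit]
  rw [herase, List.foldl_append, List.foldl_append, List.foldl_cons]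
  have hmem : ∀ y ∈ (l.take j).foldl
      (fun acc x => PySem.List.insertBy (fun a b => decide (b.2 < a.2)) x acc) [],
      y.2 < (l[j]'hj).2 := by
    intro y hy
    rw [← PySem.List.sorted_rev_eq_foldl_insertBy] at hy
    exact htake y ((PySem.List.sorted_perm _ _ _).mem_iff.mp hy)
  have hins : PySem.List.insertBy (fun a b => decide (b.2 < a.2)) (l[j]'hj)
      ((l.take j).foldl
        (fun acc x => PySem.List.insertBy (fun a b => decide (b.2 < a.2)) x acc) [])
      = (l[j]'hj) :: (l.take j).foldl
        (fun acc x => PySem.List.insertBy (fun a b => decide (b.2 < a.2)) x acc) [] :=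
    pv_insert_head (fun kv : String × Int => kv.2) _ _ hmem
  rw [hins]
  exact pv_foldl_ins_head (fun kv : String × Int => kv.2) _ _ _ hdrop

-- the selection loop lists the keys in stable descending-total order
lemma pv_select_sorted : ∀ (n : Nat) (l : List (String × Int)), l.length ≤ n →
    pvSelect l = (PySem.List.sorted l (fun kv => kv.2) true).map (fun kv => kv.1) := by
  intro n
  induction n with
  | zero =>
    intro l hlen
    have : l = [] := List.eq_nil_of_length_eq_zero (by omega)
    subst this
    rw [pvSelect.eq_def]
    have hnone : PySem.List.pop? ([] : List (String × Int)) (pvBestIdx []) = none := by decide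
    split
    · rfl
    · next x rest heq => rw [hnone] at heq; exact absurd heq (by simp)
  | succ n ih =>
    intro l hlen
    rcases Nat.eq_zero_or_pos l.length with h0 | hpos
    · have : l = [] := List.eq_nil_of_length_eq_zero h0
      subst this
      rw [pvSelect.eq_def]
      have hnone : PySem.List.pop? ([] : List (String × Int)) (pvBestIdx []) = none := by decide
      split
      · rfl
      · next x rest heq => rw [hnone] at heq; exact absurd heq (by simp)
    · obtain ⟨j, hbest, hj, hlt, hle⟩ := pv_best l hpos
      have hpop : PySem.List.pop? l (pvBestIdx l) = some (l[j]'hj, l.eraseIdx j) := by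
        rw [hbest]; exact PySem.List.pop?_natCast l j hj
      have hcvt : ∀ k : Nat, (hk : k < l.length) →
          (PySem.List.pyGetD l (k : Int) ("", 0)).2 = (l[k]'hk).2 := by
        intro k hk
        rw [PySem.List.pyGetD_natCast, List.getD_eq_getElem l _ hk]
      rw [pvSelect.eq_def]
      split
      · next heq => rw [hpop] at heq; exact absurd heq (by simp)
      · next x rest heq =>
        rw [hpop] at heq
        injection heq with heq
        injection heq with hx hr
        subst hx
        subst hr
        have hlen' : (l.eraseIdx j).length ≤ n := by
          rw [List.length_eraseIdx_of_lt hj]; omega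
        rw [ih _ hlen']
        rw [pv_head_extract l j hj
          (fun k hk hkj => by rw [← hcvt k hk, ← hcvt j hj]; exact hlt k hkj)
          (fun k hk => by rw [← hcvt k hk, ← hcvt j hj]; exact hle k hk)]
        rfl

-- the enumerate(zip(...)) stream is pvT reshuffled (plays at least as long as genres)
lemma pv_enum (genres : List String) (plays : List Int) (hpre : genres.length ≤ plays.length) :
    PySem.List.enumerate (genres.zip plays)
    = (pvT genres plays).map (fun x => (x.2.1, (x.1, x.2.2))) := by
  have hzlen : (genres.zip plays).length = genres.length := by
    rw [List.length_zip]; omega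
  rw [PySem.List.enumerate_eq_map_pyRange _ ("", 0)]
  have hlen : PySem.List.len (genres.zip plays) = (genres.length : Int) := by
    simp [PySem.List.len, hzlen]
  rw [hlen, pvT, List.map_map, PySem.List.pyRange_zero_natCast, List.map_map, List.map_map]
  refine List.map_congr_left ?_
  intro k hk
  have hk' : k < genres.length := List.mem_range.mp hk
  have hkz : k < (genres.zip plays).length := by omega
  have hkp : k < plays.length := by omega
  simp only [Function.comp_apply]
  rw [PySem.List.pyGetD_natCast, PySem.List.pyGetD_natCast, PySem.List.pyGetD_natCast,
    List.getD_eq_getElem _ _ hkz, List.getD_eq_getElem _ _ hk', List.getD_eq_getElem _ _ hkp]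
  simp [List.getElem_zip]

-- the index list 0..n-1 is strictly increasing
lemma pv_pyRange_pairwise (n : Nat) :
    (PySem.List.pyRange 0 (n : Int)).Pairwise (· < ·) := by
  rw [PySem.List.pyRange_zero_natCast]
  rw [List.pairwise_map]
  exact List.pairwise_lt_range.imp (fun h => by exact_mod_cast h)

-- per genre: A's double sort cut to two = B's streamed top-2
lemma pv_perGenre (genres : List String) (plays : List Int) (g : String) :
    (PySem.List.slice
        (PySem.List.sorted
          (PySem.List.sorted ((pvID genres plays).getD g []) (fun x => x.1) false)
          (fun x => x.2) true)
        none (some 2)).map (fun x => x.1)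
    = ((pvTop genres plays).getD g []).map (fun q => q.1) := by
  have hid : (pvID genres plays).getD g []
      = (((pvT genres plays).filter (fun x => x.1 == g)).map (fun x => x.2)) := by
    rw [pvID, PySem.Dict.getD_foldl_modify_append]
    simp
  have htop : (pvTop genres plays).getD g []
      = (((pvT genres plays).filter (fun x => x.1 == g)).map (fun x => x.2)).foldl
          (fun t x => pvPush t x.1 x.2) [] := by
    rw [pvTop, pv_getD_foldl_modify_push, List.foldl_map]
    rfl
  set G := ((pvT genres plays).filter (fun x => x.1 == g)).map (fun x => x.2) with hG
  have hGmono : G.Pairwise (fun a b => a.1 < b.1) := by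
    rw [hG, List.pairwise_map]
    refine List.Pairwise.filter _ ?_
    rw [pvT, List.pairwise_map]
    exact (pv_pyRange_pairwise genres.length).imp (fun h => h)
  have hS1 : PySem.List.sorted G (fun x => x.1) false = G :=
    PySem.List.sorted_eq_self_of_pairwise _ _ (hGmono.imp (fun h => le_of_lt h))
  rw [hid, hS1, htop, pv_top2, PySem.List.slice_to _ (by norm_num : (0:Int) ≤ 2)]
  rfl


-- ===== VERDICT (by name: the statement is the Claim_ definition above) =====
theorem solution_spec : Claim_equal_solution := by
  intro genres plays _ hpre
  show solution genres plays = solution_alt genres plays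
  simp only [solution, solution_alt]
  -- A's single loop over range(len(genres)) is a fold over pvT, and splits
  have hmap : ∀ {β : Type} (F : β → (String × Int × Int) → β) (init : β),
      (pvT genres plays).foldl F init
        = (PySem.List.pyRange 0 (genres.length : Int)).foldl
            (fun acc i => F acc (PySem.List.pyGetD genres i "", i, PySem.List.pyGetD plays i 0))
            init := by
    intro β F init
    rw [pvT, List.foldl_map]
  have hsplit : (pvT genres plays).foldl
      (fun (st : PySem.Dict String Int × PySem.Dict String (List (Int × Int))) x =>
        if st.1.contains x.1 = false then
          (st.1.insert x.1 x.2.2, st.2.insert x.1 [x.2])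
        else
          (st.1.insert x.1 (st.1.getD x.1 0 + x.2.2),
           st.2.modify x.1 [] (fun l => l ++ [x.2])))
      ((PySem.Dict.empty : PySem.Dict String Int),
       (PySem.Dict.empty : PySem.Dict String (List (Int × Int))))
      = (pvGP genres plays, pvID genres plays) := by
    rw [pv_foldlA_split _ _ _ (fun g => rfl), pvGP, pvID]
  rw [hmap] at hsplit
  rw [hsplit]
  -- B's single loop over enumerate(zip(...)) splits into pvGP and pvTop
  have hB : (PySem.List.enumerate (genres.zip plays)).foldl
      (fun (st : PySem.Dict String Int × PySem.Dict String (List (Int × Int))) x =>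
        (st.1.insert x.2.1 (st.1.getD x.2.1 0 + x.2.2),
         st.2.modify x.2.1 [] (fun t => pvPush t x.1 x.2.2)))
      ((PySem.Dict.empty : PySem.Dict String Int),
       (PySem.Dict.empty : PySem.Dict String (List (Int × Int))))
      = (pvGP genres plays, pvTop genres plays) := by
    rw [pv_enum genres plays hpre, List.foldl_map]
    show (pvT genres plays).foldl
      (fun (st : PySem.Dict String Int × PySem.Dict String (List (Int × Int))) y =>
        (st.1.insert y.1 (st.1.getD y.1 0 + y.2.2),
         st.2.modify y.1 [] (fun t => pvPush t y.2.1 y.2.2)))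
      ((PySem.Dict.empty : PySem.Dict String Int),
       (PySem.Dict.empty : PySem.Dict String (List (Int × Int)))) = _
    simp only [pvGP, pvTop]
    exact PySem.List.foldl_prod_mk
      (fun (d : PySem.Dict String Int) (x : String × Int × Int) =>
        d.insert x.1 (d.getD x.1 0 + x.2.2))
      (fun (d : PySem.Dict String (List (Int × Int))) (x : String × Int × Int) =>
        d.modify x.1 [] (fun t => pvPush t x.2.1 x.2.2))
      (pvT genres plays) _ _
  rw [hB]
  -- the genre orders coincide
  rw [pv_select_sorted (pvGP genres plays).items.length _ (le_refl _)]
  -- and each appended per-genre block coincides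
  refine PySem.List.foldl_congr_mem _ _ _ _ ?_
  intro acc g _
  rw [pv_perGenre genres plays g]
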